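-- pv_equiv track=rewrite | github.com/Rahul2k5/cf_codes | unit_Array.py | unit_Arr
-- ===== SOURCE A (Python) =====
-- def unit_Arr(arr):
--     a = 0
--     b = 0
--     sum_arr = 0
--     for i in arr:
--         if i==1:
--             a+=1
--         else:
--             b+=1
--         sum_arr+=i
--     if sum_arr>=0 and b%2==0:
--         return 0
--     else:
--         x=0
--         while sum_arr<0:
--             sum_arr+=2
--             b-=1
--             x+=1
--         if b%2!=0:
--             x+=1
--         return x
-- ===== SOURCE B (Python) =====
-- def unit_Arr(arr):
--     s = 0
--     b = 0
--     for i in arr: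
--         s += i
--         if i != 1:
--             b += 1
--     k = 0 if s >= 0 else (-s + 1) // 2
--     return k + (b - k) % 2
-- ===== Notes on version B (the rewrite author's own statement) =====
-- stated objective: simpler
-- what changed: Replaces the while loop (one iteration per +2 step) and the separate early-return branch by a closed-form ceiling-division count of +2 steps plus a parity correction, computed after a single pass over the list.
import Mathlib
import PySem

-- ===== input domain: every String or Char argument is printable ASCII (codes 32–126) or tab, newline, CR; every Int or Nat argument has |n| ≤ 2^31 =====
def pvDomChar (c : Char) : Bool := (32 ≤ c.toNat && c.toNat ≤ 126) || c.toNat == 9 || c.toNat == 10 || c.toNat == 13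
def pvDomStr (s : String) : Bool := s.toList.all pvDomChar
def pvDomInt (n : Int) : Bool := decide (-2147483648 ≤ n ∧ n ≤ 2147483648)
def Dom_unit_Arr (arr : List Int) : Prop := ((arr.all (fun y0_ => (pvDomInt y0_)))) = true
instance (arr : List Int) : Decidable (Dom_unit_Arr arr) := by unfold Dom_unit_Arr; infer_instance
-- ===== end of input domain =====

-- B replaces A's while loop by a closed-form ceiling-division count plus a parity correction (objective: simpler).

-- ===== PORT A =====
-- the for-loop body: update (a, b, sum_arr) with element i
def unit_ArrStep (st : Int × Int × Int) (i : Int) : Int × Int × Int :=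
  if i = 1 then (st.1 + 1, st.2.1, st.2.2 + i) else (st.1, st.2.1 + 1, st.2.2 + i)

-- the while loop: sum += 2; b -= 1; x += 1 while sum < 0; returns final (b, x)
def unit_ArrLoop (s b x : Int) : Int × Int :=
  if s < 0 then unit_ArrLoop (s + 2) (b - 1) (x + 1) else (b, x)
termination_by (-s).toNat
decreasing_by omega

def unit_Arr (arr : List Int) : Int :=
  let st := arr.foldl unit_ArrStep (0, 0, 0)
  if st.2.2 ≥ 0 ∧ PySem.Int.mod st.2.1 2 = 0 then 0
  else
    let bx := unit_ArrLoop st.2.2 st.2.1 0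
    if PySem.Int.mod bx.1 2 ≠ 0 then bx.2 + 1 else bx.2

-- ===== PORT B =====
-- the single-pass body: update (s, b) with element i
def unit_Arr_altStep (st : Int × Int) (i : Int) : Int × Int :=
  (st.1 + i, if i ≠ 1 then st.2 + 1 else st.2)

def unit_Arr_alt (arr : List Int) : Int :=
  let st := arr.foldl unit_Arr_altStep (0, 0)
  let k := if st.1 ≥ 0 then 0 else PySem.Int.floordiv (-st.1 + 1) 2
  k + PySem.Int.mod (st.2 - k) 2

-- ===== PRECONDITION & SPEC =====
def Spec_unit_Arr (arr : List Int) (out : Int) : Prop := out = unit_Arr_alt arr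
instance (arr : List Int) (out : Int) : Decidable (Spec_unit_Arr arr out) := by unfold Spec_unit_Arr; infer_instance

-- ===== CLAIM (what is proved, stated in full; the proofs are below) =====
def Claim_equal_unit_Arr : Prop := ∀ (arr : List Int), Dom_unit_Arr arr → Spec_unit_Arr arr (unit_Arr arr)

-- ===== LEMMAS AND PROOFS =====

-- the number of +2 steps A's while loop performs
def pvK (s : Int) : Int := if s ≥ 0 then 0 else PySem.Int.floordiv (-s + 1) 2

theorem pvK_eq (s : Int) : pvK s = if s ≥ 0 then 0 else (-s + 1) / 2 := by
  unfold pvK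
  split
  · rfl
  · rw [PySem.Int.floordiv_eq_ediv_of_pos (by omega)]

theorem loop_eq_aux (n : Nat) (s b x : Int) (h : (-s).toNat ≤ n) :
    unit_ArrLoop s b x = (b - pvK s, x + pvK s) := by
  induction n generalizing s b x with
  | zero =>
    rw [unit_ArrLoop]
    simp [pvK_eq, show ¬ s < 0 by omega, show s ≥ 0 by omega]
  | succ n ih =>
    rw [unit_ArrLoop]
    by_cases hs : s < 0
    · rw [if_pos hs, ih (s + 2) (b - 1) (x + 1) (by omega)]
      have hk : pvK s = pvK (s + 2) + 1 := by
        rw [pvK_eq, pvK_eq]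
        by_cases h2 : s + 2 ≥ 0 <;> simp [h2, show ¬ s ≥ 0 by omega] <;> omega
      rw [hk]
      simp only [Prod.mk.injEq]
      constructor <;> ring
    · rw [if_neg hs]
      simp [pvK_eq, show s ≥ 0 by omega]

theorem loop_eq (s b x : Int) : unit_ArrLoop s b x = (b - pvK s, x + pvK s) :=
  loop_eq_aux (-s).toNat s b x le_rfl

-- A's fold state (a, b, sum) carries B's fold state (sum, b) swapped in its last two components
theorem fold_rel (arr : List Int) (a b s : Int) :
    (arr.foldl unit_ArrStep (a, b, s)).2 =
      Prod.swap (arr.foldl unit_Arr_altStep (s, b)) := by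
  induction arr generalizing a b s with
  | nil => rfl
  | cons i t ih =>
    simp only [List.foldl_cons]
    by_cases hi : i = 1
    · simpa [unit_ArrStep, unit_Arr_altStep, hi] using ih (a + 1) b (s + i)
    · simpa [unit_ArrStep, unit_Arr_altStep, hi] using ih a (b + 1) (s + i)

-- the closed form agrees with the branch-and-loop computation, for any sum s and count b
theorem arith (s b : Int) :
    (if s ≥ 0 ∧ PySem.Int.mod b 2 = 0 then (0 : Int)
     else if PySem.Int.mod (unit_ArrLoop s b 0).1 2 ≠ 0 then (unit_ArrLoop s b 0).2 + 1
       else (unit_ArrLoop s b 0).2) =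
    pvK s + PySem.Int.mod (b - pvK s) 2 := by
  rw [loop_eq]
  simp only [zero_add]
  rw [PySem.Int.mod_eq_emod_of_pos (b := 2) (a := b) (by omega),
      PySem.Int.mod_eq_emod_of_pos (b := 2) (a := b - pvK s) (by omega)]
  by_cases hs : s ≥ 0
  · have hk : pvK s = 0 := by rw [pvK_eq]; simp [hs]
    rw [hk]; split_ifs <;> omega
  · have hk : pvK s = (-s + 1) / 2 := by rw [pvK_eq]; simp [hs]
    rw [hk]; split_ifs <;> omega

-- ===== VERDICT (by name: the statement is the Claim_ definition above) =====
theorem unit_Arr_spec : Claim_equal_unit_Arr := by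
  intro arr _
  unfold Spec_unit_Arr unit_Arr unit_Arr_alt
  have h := fold_rel arr 0 0 0
  simp only [h, Prod.fst_swap, Prod.snd_swap]
  exact arith (arr.foldl unit_Arr_altStep (0, 0)).1 (arr.foldl unit_Arr_altStep (0, 0)).2
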